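-- pv_equiv track=rewrite | github.com/ayoubzulfiqar/Leetcode-Medium | NumberofUniqueFlavorsAfterSharingKCandies/number_of_unique_flavors_after_sharing_k_candies.py | numberOfUniqueFlavors
-- ===== SOURCE A (Python) =====
-- import collections
--
-- def numberOfUniqueFlavors(flavors: list[int], k: int) -> int:
--     freq_map = collections.Counter(flavors)
--
--     current_unique_flavors = len(freq_map)
--
--     excess_candy_counts = []
--     for count in freq_map.values():
--         if count > 1:
--             excess_candy_counts.append(count - 1)
--
--     excess_candy_counts.sort()
--
--     for excess in excess_candy_counts:
--         if k >= excess: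
--             k -= excess
--         else:
--             k = 0
--             break
--
--     if k > 0:
--         current_unique_flavors -= k
--
--     return max(0, current_unique_flavors)
-- ===== SOURCE B (Python) =====
-- def numberOfUniqueFlavors(flavors, k):
--     u = len(set(flavors))
--     leftover = k - (len(flavors) - u)
--     return max(0, u - leftover) if leftover > 0 else u
-- ===== Notes on version B (the rewrite author's own statement) =====
-- stated objective: faster
-- what changed: Replaces the Counter + sorted-excess consumption loop with a closed form: unique = len(set), total excess = len - unique, and one arithmetic comparison of k against it, dropping the sort and both loops.
import Mathlib
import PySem

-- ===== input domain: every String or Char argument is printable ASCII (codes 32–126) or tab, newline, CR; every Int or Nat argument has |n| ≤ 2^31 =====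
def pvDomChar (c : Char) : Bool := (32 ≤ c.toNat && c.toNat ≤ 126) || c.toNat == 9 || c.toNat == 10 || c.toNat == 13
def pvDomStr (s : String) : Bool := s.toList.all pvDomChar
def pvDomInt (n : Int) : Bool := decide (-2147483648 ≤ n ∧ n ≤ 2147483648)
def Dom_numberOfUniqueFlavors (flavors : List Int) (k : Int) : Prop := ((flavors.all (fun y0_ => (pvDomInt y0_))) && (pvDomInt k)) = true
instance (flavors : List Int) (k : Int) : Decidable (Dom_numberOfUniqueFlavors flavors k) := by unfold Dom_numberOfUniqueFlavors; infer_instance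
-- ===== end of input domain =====

-- B replaces A's Counter + sorted-excess consumption loop with a closed-form count
-- (unique = len(set), total excess = len - unique); equal on all inputs.

-- ===== PORT A =====
-- the 'for excess in …: if k >= excess: k -= excess else: k = 0; break' loop, literally
def pvLoopA : List Int → Int → Int
  | [], k => k
  | e :: rest, k => if k ≥ e then pvLoopA rest (k - e) else 0

def numberOfUniqueFlavors (flavors : List Int) (k : Int) : Int :=
  let freqMap := PySem.Dict.counter flavors
  let currentUnique : Int := freqMap.size
  let excess := freqMap.values.foldl
    (fun acc count => if count > 1 then acc ++ [count - 1] else acc) []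
  let excessSorted := PySem.List.sorted excess (fun x => x) false
  let k1 := pvLoopA excessSorted k
  let currentUnique1 := if k1 > 0 then currentUnique - k1 else currentUnique
  max 0 currentUnique1

-- ===== PORT B =====
def numberOfUniqueFlavors_alt (flavors : List Int) (k : Int) : Int :=
  let u : Int := (PySem.Set.ofList flavors).length
  let leftover := k - ((flavors.length : Int) - u)
  if leftover > 0 then max 0 (u - leftover) else u

-- ===== PRECONDITION & SPEC =====
def Spec_numberOfUniqueFlavors (flavors : List Int) (k : Int) (out : Int) : Prop := out = numberOfUniqueFlavors_alt flavors k
instance (flavors : List Int) (k : Int) (out : Int) : Decidable (Spec_numberOfUniqueFlavors flavors k out) := by unfold Spec_numberOfUniqueFlavors; infer_instance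

-- ===== CLAIM (what is proved, stated in full; the proofs are below) =====
def Claim_equal_numberOfUniqueFlavors : Prop := ∀ (flavors : List Int) (k : Int), Dom_numberOfUniqueFlavors flavors k → Spec_numberOfUniqueFlavors flavors k (numberOfUniqueFlavors flavors k)

-- ===== LEMMAS AND PROOFS =====

-- A's consumption loop: with positive entries, leftover k is k - sum when sum < k, and ≤ 0 otherwise.
theorem pvLoopA_spec : ∀ (l : List Int) (k : Int), (∀ e ∈ l, 1 ≤ e) →
    (l.sum < k → pvLoopA l k = k - l.sum) ∧ (k ≤ l.sum → pvLoopA l k ≤ 0) := by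
  intro l
  induction l with
  | nil => intro k _; refine ⟨fun h => by simp [pvLoopA], fun h => by simpa [pvLoopA] using h⟩
  | cons e rest ih =>
    intro k h
    have he : (1:Int) ≤ e := h e (by simp)
    have hrest : ∀ x ∈ rest, (1:Int) ≤ x := fun x hx => h x (by simp [hx])
    have hsum : (0:Int) ≤ rest.sum :=
      List.sum_nonneg (fun x hx => le_trans (by norm_num) (hrest x hx))
    have ihk := ih (k - e) hrest
    constructor
    · intro hlt
      simp only [List.sum_cons] at hlt
      have : k ≥ e := by omega
      simp only [pvLoopA, if_pos this, List.sum_cons]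
      rw [ihk.1 (by omega)]; ring
    · intro hle
      simp only [List.sum_cons] at hle
      by_cases hk : k ≥ e
      · simp only [pvLoopA, if_pos hk]
        exact ihk.2 (by omega)
      · simp [pvLoopA, hk]

-- the filtered excess sum over a list of entries ≥ 1 is sum − length
theorem pvExcessSum : ∀ (vs : List Int), (∀ c ∈ vs, 1 ≤ c) →
    (((vs.filter (fun c => c > 1)).map (fun c => c - 1)).sum) = vs.sum - vs.length := by
  intro vs
  induction vs with
  | nil => simp
  | cons c rest ih =>
    intro h
    have hc : (1:Int) ≤ c := h c (by simp)
    have hrest := ih (fun x hx => h x (by simp [hx]))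
    by_cases h1 : c > 1
    · simp only [List.filter_cons, List.sum_cons, List.length_cons]
      rw [if_pos (by simpa using h1)]
      simp only [List.map_cons, List.sum_cons]
      rw [hrest]; push_cast; ring
    · have hceq : c = 1 := by omega
      simp only [List.filter_cons, List.sum_cons, List.length_cons]
      rw [if_neg (by simpa using h1), hrest]
      push_cast; omega

-- counter values are the multiplicities of the distinct elements
theorem pvValuesEq (flavors : List Int) :
    (PySem.Dict.counter flavors).values
      = (PySem.Set.ofList flavors).map (fun x => (flavors.count x : Int)) := by
  show ((PySem.Dict.counter flavors).items.map Prod.snd) = _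
  rw [PySem.Dict.items_counter]
  simp

theorem pvSizeEq (flavors : List Int) :
    ((PySem.Dict.counter flavors).size : Int) = ((PySem.Set.ofList flavors).length : Int) := by
  show (((PySem.Dict.counter flavors).items.length : Nat) : Int) = _
  rw [PySem.Dict.items_counter]
  simp

-- Σ over the distinct elements of their multiplicity = length
theorem pvSumCounts (flavors : List Int) :
    ((PySem.Set.ofList flavors).map (fun x => (flavors.count x : Int))).sum
      = (flavors.length : Int) := by
  have hperm : (PySem.Set.ofList flavors).Perm flavors.dedup := by
    apply (List.perm_ext_iff_of_nodup (PySem.Set.nodup_ofList _) (List.nodup_dedup flavors)).2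
    intro a
    rw [PySem.Set.mem_ofList, List.mem_dedup]
  have := (hperm.map (fun x => (flavors.count x : Int))).sum_eq
  rw [this]
  have hnat : (flavors.dedup.map (fun x => flavors.count x)).sum = flavors.length :=
    List.sum_map_count_dedup_eq_length flavors
  have : (flavors.dedup.map (fun x => (flavors.count x : Int))).sum
      = ((flavors.dedup.map (fun x => flavors.count x)).sum : Int) := by
    induction flavors.dedup with
    | nil => simp
    | cons a t iht => simp [iht]
  rw [this, hnat]

theorem pvCountsPos (flavors : List Int) :
    ∀ c ∈ (PySem.Set.ofList flavors).map (fun x => (flavors.count x : Int)), 1 ≤ c := by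
  intro c hc
  rcases List.mem_map.1 hc with ⟨x, hx, rfl⟩
  have hmem : x ∈ flavors := (PySem.Set.mem_ofList _ _).1 hx
  have : 1 ≤ flavors.count x := List.one_le_count_iff.2 hmem
  exact_mod_cast this

-- ===== VERDICT (by name: the statement is the Claim_ definition above) =====
theorem numberOfUniqueFlavors_spec : Claim_equal_numberOfUniqueFlavors := by
  intro flavors k _
  unfold Spec_numberOfUniqueFlavors numberOfUniqueFlavors numberOfUniqueFlavors_alt
  simp only []
  set vs := (PySem.Set.ofList flavors).map (fun x => (flavors.count x : Int)) with hvs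
  have hvals := pvValuesEq flavors
  have hpos : ∀ c ∈ vs, (1:Int) ≤ c := pvCountsPos flavors
  -- the built excess list
  rw [hvals]
  rw [show (fun (acc : List Int) (count : Int) => if count > 1 then acc ++ [count - 1] else acc)
      = (fun acc count => if (fun (c : Int) => decide (c > 1)) count = true then acc ++ [(fun (c : Int) => c - 1) count] else acc) from by funext a c; simp]
  rw [PySem.List.foldl_append_if]
  simp only [List.nil_append]
  set ex := ((vs.filter (fun c => c > 1)).map (fun c => c - 1)) with hex
  set exs := PySem.List.sorted ex (fun x => x) false with hexs
  have hperm : exs.Perm ex := PySem.List.sorted_perm ex (fun x => x) false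
  have hsumeq : exs.sum = ex.sum := hperm.sum_eq
  have hexpos : ∀ e ∈ exs, (1:Int) ≤ e := by
    intro e he
    have : e ∈ ex := (PySem.List.mem_sorted _ _ _ _).1 he
    rcases List.mem_map.1 this with ⟨c, hc, rfl⟩
    have : c ∈ vs := List.mem_of_mem_filter hc
    have h1 : (1:Int) < c := by simpa using List.of_mem_filter hc
    omega
  have hsum : exs.sum = (flavors.length : Int) - ((PySem.Set.ofList flavors).length : Int) := by
    rw [hsumeq, hex, pvExcessSum vs hpos, hvs]
    rw [pvSumCounts]
    simp
  have hloop := pvLoopA_spec exs k hexpos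
  rw [hsum] at hloop
  rw [pvSizeEq]
  by_cases hcase : (flavors.length : Int) - ((PySem.Set.ofList flavors).length : Int) < k
  · rw [hloop.1 hcase]
    rw [if_pos (by omega), if_pos (by omega)]
  · have hk1 := hloop.2 (by omega)
    rw [if_neg (by omega), if_neg (by omega)]
    have hu0 : (0:Int) ≤ ((PySem.Set.ofList flavors).length : Int) := by positivity
    omega
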